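-- pv_equiv track=rewrite | github.com/nikita-panacea/pci-compliance-map | open-source-pipeline/open_source_mapping.py | aggregate_mappings
-- ===== SOURCE A (Python) =====
-- def aggregate_mappings(mappings):
--     """
--     Aggregate mapping dictionaries (from each relevant chunk) into a deduplicated dictionary keyed by control code.
--     For duplicate control codes, merge the explanations.
--     """
--     aggregated = {}
--     for mapping in mappings:
--         code = mapping.get("control_code")
--         if not code:
--             continue
--         if code in aggregated:
--             existing_expl = aggregated[code]["explanation"]
--             new_expl = mapping.get("explanation", "")
--             if new_expl and new_expl not in existing_expl:
--                 aggregated[code]["explanation"] += " " + new_expl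
--         else:
--             aggregated[code] = {
--                 "description": mapping.get("description", ""),
--                 "explanation": mapping.get("explanation", "")
--             }
--     return aggregated
-- ===== SOURCE B (Python) =====
-- def aggregate_mappings(mappings):
--     """
--     Aggregate mapping dictionaries into a deduplicated dictionary keyed by control code.
--     Two passes: first group mappings by control code (first-seen order, skipping falsy
--     codes), then merge each group's explanations into one entry.
--     """
--     groups = {}
--     for mapping in mappings:
--         code = mapping.get("control_code")
--         if code:
--             groups.setdefault(code, []).append(mapping)
--     aggregated = {}
--     for code, group in groups.items():
--         desc = group[0].get("description", "")
--         expl = group[0].get("explanation", "")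
--         for mapping in group[1:]:
--             new_expl = mapping.get("explanation", "")
--             if new_expl and new_expl not in expl:
--                 expl += " " + new_expl
--         aggregated[code] = {"description": desc, "explanation": expl}
--     return aggregated
-- ===== Notes on version B (the rewrite author's own statement) =====
-- stated objective: alternative
-- what changed: B replaces A's single incremental fold over a dict-of-dicts with a two-pass decomposition: first group mappings by control code into ordered lists, then fold each group once to merge its explanations.
import Mathlib
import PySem

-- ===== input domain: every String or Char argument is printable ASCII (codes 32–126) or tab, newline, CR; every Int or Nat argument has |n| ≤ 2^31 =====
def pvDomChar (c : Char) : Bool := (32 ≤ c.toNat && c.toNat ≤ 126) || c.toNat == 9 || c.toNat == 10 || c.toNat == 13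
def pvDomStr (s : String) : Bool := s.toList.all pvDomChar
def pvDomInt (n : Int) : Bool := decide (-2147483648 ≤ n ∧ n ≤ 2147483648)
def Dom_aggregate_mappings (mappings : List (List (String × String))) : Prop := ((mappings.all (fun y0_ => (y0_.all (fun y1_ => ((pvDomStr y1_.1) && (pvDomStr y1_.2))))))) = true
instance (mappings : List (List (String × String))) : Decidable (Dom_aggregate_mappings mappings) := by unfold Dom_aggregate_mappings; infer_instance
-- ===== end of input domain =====

-- B replaces A's single incremental fold over a dict-of-dicts with a two-pass decomposition
-- (group by control code first, then merge each group); same return value, similar cost.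

-- ===== PORT A =====
-- one step of A's loop body ('aggregated[code]["explanation"]' is read with getD "":
-- the key is always present in entries A itself builds, so this is exact)
def aStep (agg : PySem.Dict String (PySem.Dict String String)) (mapping : List (String × String)) :
    PySem.Dict String (PySem.Dict String String) :=
  match (PySem.Dict.mk mapping).get? "control_code" with
  | none => agg
  | some code =>
    if code = "" then agg
    else
      match agg.get? code with
      | some entry =>
        let existing_expl := entry.getD "explanation" ""
        let new_expl := (PySem.Dict.mk mapping).getD "explanation" ""
        if new_expl ≠ "" ∧ PySem.Str.isIn new_expl existing_expl = false then
          agg.insert code (entry.insert "explanation" (existing_expl ++ " " ++ new_expl))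
        else agg
      | none =>
        agg.insert code (PySem.Dict.mk
          [("description", (PySem.Dict.mk mapping).getD "description" ""),
           ("explanation", (PySem.Dict.mk mapping).getD "explanation" "")])

def aggregate_mappings (mappings : List (List (String × String))) : List (String × List (String × String)) :=
  (mappings.foldl aStep PySem.Dict.empty).items.map (fun p => (p.1, p.2.items))

-- ===== PORT B =====
-- pass 1: groups.setdefault(code, []).append(mapping)
def bGroup (g : PySem.Dict String (List (List (String × String)))) (mapping : List (String × String)) :
    PySem.Dict String (List (List (String × String))) :=
  match (PySem.Dict.mk mapping).get? "control_code" with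
  | none => g
  | some code => if code = "" then g else g.modify code [] (· ++ [mapping])

-- inner fold of pass 2
def bMergeExpl (expl : String) (mapping : List (String × String)) : String :=
  let new_expl := (PySem.Dict.mk mapping).getD "explanation" ""
  if new_expl ≠ "" ∧ PySem.Str.isIn new_expl expl = false then expl ++ " " ++ new_expl else expl

-- pass 2 body: build one aggregated entry from a (never actually empty) group
def bEntry (group : List (List (String × String))) : PySem.Dict String String :=
  match group with
  | [] => PySem.Dict.mk []
  | m :: rest =>
    PySem.Dict.mk
      [("description", (PySem.Dict.mk m).getD "description" ""),
       ("explanation", rest.foldl bMergeExpl ((PySem.Dict.mk m).getD "explanation" ""))]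

def aggregate_mappings_alt (mappings : List (List (String × String))) : List (String × List (String × String)) :=
  ((mappings.foldl bGroup PySem.Dict.empty).items.foldl
      (fun r p => r.insert p.1 (bEntry p.2)) PySem.Dict.empty).items.map (fun p => (p.1, p.2.items))

-- ===== PRECONDITION & SPEC =====
def Spec_aggregate_mappings (mappings : List (List (String × String))) (out : List (String × List (String × String))) : Prop := out = aggregate_mappings_alt mappings
instance (mappings : List (List (String × String))) (out : List (String × List (String × String))) : Decidable (Spec_aggregate_mappings mappings out) := by unfold Spec_aggregate_mappings; infer_instance

-- ===== CLAIM (what is proved, stated in full; the proofs are below) =====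
def Claim_equal_aggregate_mappings : Prop := ∀ (mappings : List (List (String × String))), Dom_aggregate_mappings mappings → Spec_aggregate_mappings mappings (aggregate_mappings mappings)

-- ===== LEMMAS AND PROOFS =====

lemma bEntry_cons (m : List (String × String)) (rest : List (List (String × String))) :
    bEntry (m :: rest) = PySem.Dict.mk
      [("description", (PySem.Dict.mk m).getD "description" ""),
       ("explanation", rest.foldl bMergeExpl ((PySem.Dict.mk m).getD "explanation" ""))] := rfl

-- lookup through a key-preserving value map
lemma get?_mk_map_snd {ν ν' : Type} (f : ν → ν') (l : List (String × ν)) (c : String) :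
    (PySem.Dict.mk (l.map (fun p => (p.1, f p.2)))).get? c = ((PySem.Dict.mk l).get? c).map f := by
  induction l with
  | nil => simp [PySem.Dict.get?]
  | cons p t ih =>
    obtain ⟨a, b⟩ := p
    by_cases h : a = c <;> simp [PySem.Dict.get?_mk_cons, h, ih]

lemma snd_eq_of_nodup_fst {α β : Type} {l : List (α × β)} (hnd : (l.map Prod.fst).Nodup)
    {k : α} {v w : β} (h1 : (k, v) ∈ l) (h2 : (k, w) ∈ l) : v = w := by
  induction l with
  | nil => simp at h1
  | cons p t ih =>
    simp only [List.map_cons, List.nodup_cons] at hnd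
    obtain ⟨a, b⟩ := p
    rcases List.mem_cons.1 h1 with hh1 | hh1 <;> rcases List.mem_cons.1 h2 with hh2 | hh2
    · exact ((Prod.mk.injEq _ _ _ _ ▸ hh2.trans hh1.symm).2).symm
    · cases hh1
      exact absurd (List.mem_map.2 ⟨(k, w), hh2, rfl⟩ : k ∈ List.map Prod.fst t) hnd.1
    · cases hh2
      exact absurd (List.mem_map.2 ⟨(k, v), hh1, rfl⟩ : k ∈ List.map Prod.fst t) hnd.1
    · exact ih hnd.2 hh1 hh2

-- the three-part invariant of the two folds
lemma inv (ms : List (List (String × String))) :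
    (ms.foldl aStep PySem.Dict.empty).items
      = (ms.foldl bGroup PySem.Dict.empty).items.map (fun p => (p.1, bEntry p.2))
    ∧ (ms.foldl bGroup PySem.Dict.empty).keys.Nodup
    ∧ ∀ p ∈ (ms.foldl bGroup PySem.Dict.empty).items, p.2 ≠ [] := by
  induction ms using List.reverseRecOn with
  | nil => exact ⟨rfl, List.nodup_nil, by intro p hp; simp [PySem.Dict.empty] at hp⟩
  | append_singleton ms m ih =>
    obtain ⟨hitems, hnd, hne⟩ := ih
    simp only [List.foldl_append, List.foldl_cons, List.foldl_nil]
    set g := List.foldl bGroup PySem.Dict.empty ms with hg_def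
    set A := List.foldl aStep PySem.Dict.empty ms with hA_def
    have hAmk : A = PySem.Dict.mk (g.items.map (fun p => (p.1, bEntry p.2))) :=
      PySem.Dict.ext (by simpa using hitems)
    have hAget : ∀ c, A.get? c = (g.get? c).map bEntry := by
      intro c; rw [hAmk, get?_mk_map_snd]
    cases hc : (PySem.Dict.mk m).get? "control_code" with
    | none => simp only [aStep, bGroup, hc]; exact ⟨hitems, hnd, hne⟩
    | some code =>
      by_cases hce : code = ""
      · simp only [aStep, bGroup, hc, if_pos hce]; exact ⟨hitems, hnd, hne⟩
      cases hg : g.get? code with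
      | none =>
        have hgc : g.contains code = false := by
          rw [PySem.Dict.contains_eq_isSome_get?, hg]; rfl
        have hAc : A.get? code = none := by rw [hAget, hg]; rfl
        have hmod : g.modify code [] (· ++ [m]) = g.insert code [m] := by
          show g.insert code (g.getD code [] ++ [m]) = _
          rw [PySem.Dict.getD_of_not_contains _ _ hgc]
          rfl
        simp only [aStep, bGroup, hc, if_neg hce, hAc, hmod]
        refine ⟨?_, ?_, ?_⟩
        · rw [PySem.Dict.items_insert_of_not_contains _ _ (by
              rw [PySem.Dict.contains_eq_isSome_get?, hAc]; rfl),
            PySem.Dict.items_insert_of_not_contains _ _ hgc, List.map_append, hitems]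
          rfl
        · rw [PySem.Dict.keys_insert_of_not_contains _ _ hgc]
          have hcm : code ∉ g.keys := fun h =>
            by rw [(PySem.Dict.contains_iff_mem_keys g code).2 h] at hgc; cases hgc
          simp [List.nodup_append, hnd]
          exact fun a ha h => hcm (h ▸ ha)
        · intro p hp
          rw [PySem.Dict.items_insert_of_not_contains _ _ hgc] at hp
          rcases List.mem_append.1 hp with h | h
          · exact hne p h
          · simp at h; subst h; simp
      | some grp =>
        have hgc : g.contains code = true := by
          rw [PySem.Dict.contains_eq_isSome_get?, hg]; rfl
        have hmemg : (code, grp) ∈ g.items := PySem.Dict.mem_items_of_get?_eq_some g hg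
        obtain ⟨m0, rest, rfl⟩ : ∃ m0 rest, grp = m0 :: rest := by
          cases grp with
          | nil => exact absurd rfl (hne _ hmemg)
          | cons a b => exact ⟨a, b, rfl⟩
        have hAc : A.get? code = some (bEntry (m0 :: rest)) := by rw [hAget, hg]; rfl
        have hAcont : A.contains code = true := by
          rw [PySem.Dict.contains_eq_isSome_get?, hAc]; rfl
        have hmod : g.modify code [] (· ++ [m]) = g.insert code ((m0 :: rest) ++ [m]) := by
          show g.insert code (g.getD code [] ++ [m]) = _
          rw [PySem.Dict.getD_of_get?_eq_some _ _ hg]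
        have hE : (bEntry (m0 :: rest)).getD "explanation" ""
            = rest.foldl bMergeExpl ((PySem.Dict.mk m0).getD "explanation" "") := by
          rw [bEntry, PySem.Dict.getD_eq_get?_getD]
          simp [PySem.Dict.get?_mk_cons]
        have hkeq : ∀ p : String × List (List (String × String)), p ∈ g.items →
            (p.1 == code) = true → p = (code, m0 :: rest) := by
          intro p hp hpc
          have h1 : p.1 = code := by simpa using hpc
          obtain ⟨a, b⟩ := p
          simp only at h1; subst h1
          exact congrArg _ (snd_eq_of_nodup_fst (by simpa [PySem.Dict.keys] using hnd) hp hmemg)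
        have hentry : ∀ v : String, (bEntry (m0 :: rest)).insert "explanation" v
            = PySem.Dict.mk
              [("description", (PySem.Dict.mk m0).getD "description" ""),
               ("explanation", v)] := by
          intro v
          apply PySem.Dict.ext
          rw [bEntry, PySem.Dict.items_insert_of_contains _ _ (by simp [PySem.Dict.contains_mk])]
          simp
        have hbapp : bEntry (m0 :: (rest ++ [m]))
            = PySem.Dict.mk
              [("description", (PySem.Dict.mk m0).getD "description" ""),
               ("explanation", bMergeExpl (rest.foldl bMergeExpl ((PySem.Dict.mk m0).getD "explanation" "")) m)] := by
          simp [bEntry, List.foldl_append]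
        simp only [aStep, bGroup, hc, if_neg hce, hAc, hmod, hE]
        have hkeys2 : (g.insert code ((m0 :: rest) ++ [m])).keys = g.keys :=
          PySem.Dict.keys_insert_of_contains _ _ hgc
        have hne2 : ∀ p ∈ (g.insert code ((m0 :: rest) ++ [m])).items, p.2 ≠ [] := by
          intro p hp
          rw [PySem.Dict.items_insert_of_contains _ _ hgc] at hp
          obtain ⟨q, hq, hqe⟩ := List.mem_map.1 hp
          by_cases hqc : (q.1 == code) = true
          · rw [if_pos hqc] at hqe; rw [← hqe]; simp
          · rw [if_neg hqc] at hqe; rw [← hqe]; exact hne q hq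
        by_cases hcond : (PySem.Dict.mk m).getD "explanation" "" ≠ "" ∧
            PySem.Str.isIn ((PySem.Dict.mk m).getD "explanation" "")
              (rest.foldl bMergeExpl ((PySem.Dict.mk m0).getD "explanation" "")) = false
        · rw [if_pos hcond]
          refine ⟨?_, hkeys2 ▸ hnd, hne2⟩
          rw [PySem.Dict.items_insert_of_contains _ _ hAcont,
            PySem.Dict.items_insert_of_contains _ _ hgc, hitems, List.map_map, List.map_map]
          refine List.map_congr_left ?_
          intro p hp
          simp only [Function.comp]
          by_cases hpc : (p.1 == code) = true
          · have hp' := hkeq p hp hpc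
            subst hp'
            simp only [hpc, if_true]
            rw [hentry]
            simp only [List.cons_append, bEntry_cons, List.foldl_append, List.foldl_cons, List.foldl_nil, bMergeExpl]
            simp only [if_pos hcond]
          · simp only [if_neg hpc]
        · rw [if_neg hcond]
          refine ⟨?_, hkeys2 ▸ hnd, hne2⟩
          rw [PySem.Dict.items_insert_of_contains _ _ hgc, hitems, List.map_map]
          symm
          refine List.map_congr_left ?_
          intro p hp
          simp only [Function.comp]
          by_cases hpc : (p.1 == code) = true
          · have hp' := hkeq p hp hpc
            subst hp'
            simp only [hpc, if_true]
            simp only [List.cons_append, bEntry_cons, List.foldl_append, List.foldl_cons, List.foldl_nil, bMergeExpl]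
            simp only [if_neg hcond]
          · simp only [if_neg hpc]

-- ===== VERDICT (by name: the statement is the Claim_ definition above) =====
theorem aggregate_mappings_spec : Claim_equal_aggregate_mappings := by
  intro ms _
  unfold Spec_aggregate_mappings aggregate_mappings aggregate_mappings_alt
  obtain ⟨hitems, hnd, -⟩ := inv ms
  rw [hitems]
  have hfi := PySem.Dict.items_foldl_insert_fresh
    (l := (List.foldl bGroup PySem.Dict.empty ms).items)
    (k := fun p => p.1) (v := fun p => bEntry p.2) (d := PySem.Dict.empty)
    (fun a _ => PySem.Dict.contains_empty _) (by simpa [PySem.Dict.keys] using hnd)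
  rw [hfi]
  simp [List.map_map, PySem.Dict.empty]
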